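-- pv_equiv track=rewrite | github.com/crystalhaohua0408/Informatics_553 | Assignment3/Assignment3/nakareseisoon_vitid_DocSimilarity.py | minHashing
-- ===== SOURCE A (Python) =====
-- def minHashing(num_hash,all_shingle_list,doc_shingle_list):
--     """
--     \n all_shingle_list - contains all sorted shingles in the corpus, format: ['a','b',...]
--     \n doc_shingle_list - contains the list of a tuple of file_name and its shingles set
--     \n                    format [(txt_name,set(...)),(txt_name,set(...)),...]
--     \n return doc_min_hash_list - contains the list of a tuple of file_name and its min-hash signature
--                           format [(txt_name,[h_A1,h_A2,...]),(txt_name,[h_B1,h_B2,...]),...]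
--     """
--     num_shingle = len(all_shingle_list)
--     #hash_table - [
--     #               [h1,h2,...,h_n],
--     #               [h1,h2,...,h_n],
--     #               [h1,h2,...,h_n],
--     #               ...
--     #             ]
--     #number of rows = num_shingle
--     #number of columns = num_hash
--     hash_table = [[-1 for x in range(0,num_hash)] for x in range(0,num_shingle)]
--
--     #construct the hash value for each row for all num_hash
--     for i in range(0,num_shingle):
--         #compute the hash of the current row for shingle i th
--         for hash_index in range(1,num_hash+1):
--             h = ( (hash_index * i) + 1 ) % num_shingle
--             hash_table[i][hash_index-1] = h
--     #now, calculate the mini-hash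
--     #construct a signature-table
--     #signature_table - [
--     #                    [h_A,h_B,h_C],
--     #                    [h_A,h_B,h_C],
--     #                    [h_A,h_B,h_C],
--     #                    ...
--     #                  ]
--     signature_table = [[-1 for x in range(0,len(doc_shingle_list))] for x in range(0,num_hash)]
--     #looping from the first shingle to the last
--     for i in range(0,num_shingle):
--         shingle = all_shingle_list[i]
--         for j in range(0,len(doc_shingle_list)):
--             doc_shingle = doc_shingle_list[j]
--             doc,shingle_set = doc_shingle[0],doc_shingle[1]
--             if(shingle in shingle_set):
--                 #the corresponding entry in chracteristic matrix is "1"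
--                 #re-calculate the corresponding signature
--                 signatures = [row[j] for row in signature_table]
--                 current_hash = hash_table[i]
--                 for k in range(len(signatures)):
--                     if signatures[k] == -1 or signatures[k] > current_hash[k]:
--                         signatures[k] = current_hash[k]
--                 #re-assign signatures to the signature_table
--                 for k in range(len(signatures)):
--                     signature_table[k][j] = signatures[k]
--
--     doc_min_hash_list = []
--     #construct the min-hash signature from the signature_table
--     for i in range(0,len(doc_shingle_list)):
--         doc_shingle = doc_shingle_list[i]
--         doc,shingle_set = doc_shingle[0],doc_shingle[1]
--         min_hash_signature = [row[i] for row in signature_table]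
--         doc_min_hash_list.append((doc,min_hash_signature))
--
--     return doc_min_hash_list
-- ===== SOURCE B (Python) =====
-- def minHashing(num_hash, all_shingle_list, doc_shingle_list):
--     """Doc-major re-implementation: no precomputed hash table and no mutable
--     signature table; for each document collect the indices of its shingles in
--     all_shingle_list once, then each signature entry is a direct min over
--     those indices (min of an empty collection is -1)."""
--     n = len(all_shingle_list)
--     result = []
--     for doc, shingle_set in doc_shingle_list:
--         hits = [i for i in range(n) if all_shingle_list[i] in shingle_set]
--         signature = [min((((k + 1) * i + 1) % n for i in hits), default=-1)
--                      for k in range(num_hash)]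
--         result.append((doc, signature))
--     return result
-- ===== Notes on version B (the rewrite author's own statement) =====
-- stated objective: alternative
-- what changed: B drops A's precomputed hash table and mutable signature table entirely: it walks the documents once and computes each signature entry as a direct min over the document's matching shingle indices, instead of A's shingle-major scan that copies and rewrites a signature column on every shingle/document match.
import Mathlib
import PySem

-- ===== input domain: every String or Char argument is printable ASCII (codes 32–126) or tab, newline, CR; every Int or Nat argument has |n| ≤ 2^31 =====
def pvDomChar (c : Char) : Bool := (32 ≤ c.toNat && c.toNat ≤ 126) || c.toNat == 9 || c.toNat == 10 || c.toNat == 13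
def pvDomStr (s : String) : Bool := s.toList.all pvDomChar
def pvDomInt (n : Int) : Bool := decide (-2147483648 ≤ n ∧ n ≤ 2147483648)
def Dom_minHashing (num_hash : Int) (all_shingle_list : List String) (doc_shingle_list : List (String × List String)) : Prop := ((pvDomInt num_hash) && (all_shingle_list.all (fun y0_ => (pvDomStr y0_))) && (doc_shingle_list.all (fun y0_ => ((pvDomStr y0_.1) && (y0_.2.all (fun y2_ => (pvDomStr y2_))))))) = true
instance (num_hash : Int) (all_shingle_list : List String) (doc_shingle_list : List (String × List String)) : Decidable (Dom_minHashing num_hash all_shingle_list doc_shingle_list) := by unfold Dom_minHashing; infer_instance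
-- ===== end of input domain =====

-- B replaces A's shingle-major pass over precomputed hash/signature tables by a doc-major pass
-- that takes a direct min per signature entry over the document's own matching shingle rows.

-- ===== PORT A =====
def minHashing (num_hash : Int) (all_shingle_list : List String) (doc_shingle_list : List (String × List String)) : List (String × List Int) :=
  let num_shingle : Int := PySem.List.len all_shingle_list
  let hash_table0 : List (List Int) :=
    (PySem.List.pyRange 0 num_shingle 1).map (fun _ => (PySem.List.pyRange 0 num_hash 1).map (fun _ => (-1 : Int)))
  let hash_table : List (List Int) :=
    (PySem.List.pyRange 0 num_shingle 1).foldl (fun ht i =>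
      (PySem.List.pyRange 1 (num_hash + 1) 1).foldl (fun ht hash_index =>
        PySem.List.pySetD ht i
          (PySem.List.pySetD (PySem.List.pyGetD ht i []) (hash_index - 1)
            (PySem.Int.mod (hash_index * i + 1) num_shingle))) ht) hash_table0
  let signature_table0 : List (List Int) :=
    (PySem.List.pyRange 0 num_hash 1).map (fun _ =>
      (PySem.List.pyRange 0 (PySem.List.len doc_shingle_list) 1).map (fun _ => (-1 : Int)))
  let signature_table : List (List Int) :=
    (PySem.List.pyRange 0 num_shingle 1).foldl (fun st i =>
      let shingle := PySem.List.pyGetD all_shingle_list i ""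
      (PySem.List.pyRange 0 (PySem.List.len doc_shingle_list) 1).foldl (fun st j =>
        let doc_shingle := PySem.List.pyGetD doc_shingle_list j ("", [])
        let shingle_set := doc_shingle.2
        if shingle ∈ shingle_set then
          let signatures := st.map (fun row => PySem.List.pyGetD row j 0)
          let current_hash := PySem.List.pyGetD hash_table i []
          let signatures :=
            (PySem.List.pyRange 0 (PySem.List.len signatures) 1).foldl (fun sg k =>
              if PySem.List.pyGetD sg k 0 = -1 ∨ PySem.List.pyGetD sg k 0 > PySem.List.pyGetD current_hash k 0 then
                PySem.List.pySetD sg k (PySem.List.pyGetD current_hash k 0)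
              else sg) signatures
          (PySem.List.pyRange 0 (PySem.List.len signatures) 1).foldl (fun st k =>
            PySem.List.pySetD st k
              (PySem.List.pySetD (PySem.List.pyGetD st k []) j (PySem.List.pyGetD signatures k 0))) st
        else st) st) signature_table0
  (PySem.List.pyRange 0 (PySem.List.len doc_shingle_list) 1).foldl (fun out i =>
    let doc_shingle := PySem.List.pyGetD doc_shingle_list i ("", [])
    let min_hash_signature := signature_table.map (fun row => PySem.List.pyGetD row i 0)
    out ++ [(doc_shingle.1, min_hash_signature)]) []


-- ===== PORT B =====
def minHashing_alt (num_hash : Int) (all_shingle_list : List String) (doc_shingle_list : List (String × List String)) : List (String × List Int) :=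
  let n : Int := PySem.List.len all_shingle_list
  doc_shingle_list.map (fun p =>
    let hits := (PySem.List.pyRange 0 n 1).filter (fun i => decide (PySem.List.pyGetD all_shingle_list i "" ∈ p.2))
    (p.1, (PySem.List.pyRange 0 num_hash 1).map (fun k =>
      (PySem.List.min? (hits.map (fun i => PySem.Int.mod ((k + 1) * i + 1) n)) (fun x => x)).getD (-1))))

-- ===== PRECONDITION & SPEC =====
def Spec_minHashing (num_hash : Int) (all_shingle_list : List String) (doc_shingle_list : List (String × List String)) (out : List (String × List Int)) : Prop := out = minHashing_alt num_hash all_shingle_list doc_shingle_list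
instance (num_hash : Int) (all_shingle_list : List String) (doc_shingle_list : List (String × List String)) (out : List (String × List Int)) : Decidable (Spec_minHashing num_hash all_shingle_list doc_shingle_list out) := by unfold Spec_minHashing; infer_instance

-- ===== CLAIM (what is proved, stated in full; the proofs are below) =====
def Claim_equal_minHashing : Prop := ∀ (num_hash : Int) (all_shingle_list : List String) (doc_shingle_list : List (String × List String)), Dom_minHashing num_hash all_shingle_list doc_shingle_list → Spec_minHashing num_hash all_shingle_list doc_shingle_list (minHashing num_hash all_shingle_list doc_shingle_list)

-- ===== LEMMAS AND PROOFS =====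


theorem pv_set_getD_self {α : Type} (l : List α) (n : Nat) (d : α) (h : n < l.length) :
    l.set n (l.getD n d) = l := by
  rw [List.getD_eq_getElem l d h]
  exact List.set_getElem_self h

theorem pv_rw_fold {α β : Type} (d : α) (i : Nat) (f : α → β → α) :
    ∀ (L : List β) (t : List α),
      L.foldl (fun t x => t.set i (f (t.getD i d) x)) t = t.set i (L.foldl f (t.getD i d)) := by
  intro L
  induction L with
  | nil =>
    intro t
    by_cases hi : i < t.length
    · exact (pv_set_getD_self t i d hi).symm
    · simp [List.set_eq_of_length_le (by omega : t.length ≤ i)]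
  | cons x L ih =>
    intro t
    by_cases hi : i < t.length
    · simp only [List.foldl_cons]
      rw [ih]
      have h1 : (t.set i (f (t.getD i d) x)).getD i d = f (t.getD i d) x := by
        rw [List.getD_eq_getElem _ d (by simpa using hi)]
        simp
      rw [h1, List.set_set]
    · have hn : ∀ w : α, t.set i w = t := fun w => List.set_eq_of_length_le (by omega)
      simp only [List.foldl_cons, hn]
      rw [ih, hn]

theorem pv_setfold {α : Type} (d : α) (F : Nat → α → α) :
    ∀ (c s : Nat) (r : List α), s + c ≤ r.length →
      (List.range' s c).foldl (fun r t => r.set t (F t (r.getD t d))) r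
        = r.take s ++ (List.range' s c).map (fun t => F t (r.getD t d)) ++ r.drop (s + c) := by
  intro c
  induction c with
  | zero => intro s r h; simp
  | succ c ih =>
    intro s r h
    rw [List.range'_succ]
    simp only [List.foldl_cons, List.map_cons]
    have hs : s < r.length := by omega
    set v := F s (r.getD s d) with hv
    have hlen : (r.set s v).length = r.length := by simp
    rw [ih (s+1) (r.set s v) (by omega)]
    have hgd : ∀ t, t ∈ List.range' (s+1) c → (r.set s v).getD t d = r.getD t d := by
      intro t ht
      have : s + 1 ≤ t := by
        have := List.mem_range'_1.mp ht; omega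
      unfold List.getD
      rw [List.getElem?_set_ne (by omega)]
    have htake : (r.set s v).take (s+1) = r.take s ++ [v] := by
      apply List.ext_getElem
      · simp; omega
      · intro idx h1 h2
        rw [List.getElem_take, List.getElem_set]
        rcases Nat.lt_or_ge idx s with hlt | hge
        · rw [List.getElem_append_left (by simpa [Nat.min_eq_left (Nat.le_of_lt hs)] using hlt)]
          simp
          omega
        · have : idx = s := by simp at h1; omega
          subst this
          simp
    have hdrop : (r.set s v).drop (s+1+c) = r.drop (s+1+c) := List.drop_set_of_lt (by omega)
    rw [htake, hdrop, List.map_congr_left (fun t ht => congrArg (F t) (hgd t ht))]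
    simp only [List.append_assoc, List.cons_append, List.nil_append]
    have : s + 1 + c = s + (c+1) := by omega
    rw [this]

theorem pv_setfold0' {α : Type} (d : α) (F : Nat → α → α) (n : Nat) (r : List α) (hl : r.length = n) :
    (List.range n).foldl (fun r t => r.set t (F t (r.getD t d))) r
      = (List.range n).map (fun t => F t (r.getD t d)) := by
  subst hl
  have h := pv_setfold d F r.length 0 r (by omega)
  simpa [List.range_eq_range'] using h

theorem pv_fold_step_aux (t : List Int) : ∀ (x : Int), 0 ≤ x → (∀ y ∈ t, 0 ≤ y) →
    t.foldl (fun s h => if s = -1 ∨ s > h then h else s) x = t.foldl min x := by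
  induction t with
  | nil => intro x hx ht; rfl
  | cons y t ih =>
    intro x hx ht
    simp only [List.foldl_cons]
    have hy : 0 ≤ y := ht y (by simp)
    have hstep : (if x = -1 ∨ x > y then y else x) = min x y := by
      split <;> omega
    rw [hstep]
    exact ih (min x y) (le_min hx hy) (fun z hz => ht z (by simp [hz]))

theorem pv_fold_step_min (xs : List Int) (hnn : ∀ x ∈ xs, 0 ≤ x) :
    xs.foldl (fun s h => if s = -1 ∨ s > h then h else s) (-1) = (PySem.List.min? xs (fun x => x)).getD (-1) := by
  cases xs with
  | nil => rfl
  | cons x t =>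
    rw [PySem.List.min?_id_cons]
    rw [List.foldl_cons, Option.getD_some]
    have hx : 0 ≤ x := hnn x (by simp)
    rw [if_pos (Or.inl rfl)]
    exact pv_fold_step_aux t x hx (fun y hy => hnn y (by simp [hy]))
theorem pv_range0 (nH : Int) : PySem.List.pyRange 0 nH 1 = (List.range nH.toNat).map (fun k : Nat => (k:Int)) := by
  have h := PySem.List.pyRange_one 0 nH
  simp only [Int.sub_zero, Int.zero_add] at h
  exact h
theorem pv_range1 (nH : Int) : PySem.List.pyRange 1 (nH+1) 1 = (List.range nH.toNat).map (fun k : Nat => 1 + (k:Int)) := by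
  have h := PySem.List.pyRange_one 1 (nH+1)
  simp only [add_sub_cancel_right] at h
  exact h
theorem pv_range0n (nn : Nat) : PySem.List.pyRange 0 (nn:Int) 1 = (List.range nn).map (fun k : Nat => (k:Int)) := by
  have h := pv_range0 (nn:Int)
  simpa using h


def pvHv (nS : Int) (i k : Nat) : Int := PySem.Int.mod (((k : Int) + 1) * (i : Int) + 1) nS

theorem pv_A_ht (nH : Int) (nn : Nat) :
  ((PySem.List.pyRange 0 ((nn:Int)) 1).foldl (fun ht i =>
      (PySem.List.pyRange 1 (nH + 1) 1).foldl (fun ht hash_index =>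
        PySem.List.pySetD ht i
          (PySem.List.pySetD (PySem.List.pyGetD ht i []) (hash_index - 1)
            (PySem.Int.mod (hash_index * i + 1) ((nn:Int))))) ht)
    ((PySem.List.pyRange 0 ((nn:Int)) 1).map (fun _ => (PySem.List.pyRange 0 nH 1).map (fun _ => (-1 : Int)))))
  = (List.range nn).map (fun i => (List.range nH.toNat).map (fun k => pvHv (nn:Int) i k)) := by
  rw [pv_range0n nn, pv_range0 nH, pv_range1 nH]
  rw [List.foldl_map]
  have hbody : (fun (ht : List (List Int)) (i : Nat) =>
      ((List.range nH.toNat).map (fun k : Nat => 1 + (k:Int))).foldl (fun ht hash_index =>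
        PySem.List.pySetD ht ((i:Int))
          (PySem.List.pySetD (PySem.List.pyGetD ht ((i:Int)) []) (hash_index - 1)
            (PySem.Int.mod (hash_index * (i:Int) + 1) ((nn:Int))))) ht)
      = (fun (ht : List (List Int)) (i : Nat) =>
          ht.set i ((List.range nH.toNat).foldl
            (fun row k => row.set k (PySem.Int.mod ((1 + (k:Int)) * (i:Int) + 1) ((nn:Int))))
            (ht.getD i []))) := by
    funext ht i
    rw [List.foldl_map]
    have h2 := pv_rw_fold ([] : List Int) i
      (fun row (k:Nat) => row.set k (PySem.Int.mod ((1 + (k:Int)) * (i:Int) + 1) ((nn:Int))))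
      (List.range nH.toNat) ht
    simp only [add_sub_cancel_left, PySem.List.pySetD_natCast, PySem.List.pyGetD_natCast] at h2 ⊢
    exact h2
  rw [hbody]
  simp only [List.map_map]
  rw [pv_setfold0' ([] : List Int)
    (fun i ht => (List.range nH.toNat).foldl
      (fun row k => row.set k (PySem.Int.mod ((1 + (k:Int)) * (i:Int) + 1) ((nn:Int)))) ht)
    nn _ (by simp)]
  apply List.map_congr_left
  intro i hi
  have hi' : i < nn := List.mem_range.mp hi
  rw [PySem.List.getD_map_range _ nn i [] hi']
  simp only [Function.comp_def]
  have hrow := pv_setfold0' (0 : Int)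
    (fun k _ => PySem.Int.mod ((1 + (k:Int)) * (i:Int) + 1) ((nn:Int)))
    nH.toNat ((List.range nH.toNat).map (fun _ : Nat => (-1:Int)))
    (by simp)
  beta_reduce at hrow
  rw [hrow]
  apply List.map_congr_left
  intro k _
  simp only [pvHv]
  ring_nf


theorem pv_condset {α : Type} (r : List α) (k : Nat) (v : α) (d : α) (c : Prop) [Decidable c] :
    (if c then r.set k v else r) = r.set k (if c then v else r.getD k d) := by
  by_cases hk : k < r.length
  · split
    · rfl
    · exact (pv_set_getD_self r k d hk).symm
  · have h2 : ∀ w : α, r.set k w = r := fun w => List.set_eq_of_length_le (by omega)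
    simp [h2]

def pvStep (s h : Int) : Int := if s = -1 ∨ s > h then h else s

-- signature entry (k, j) after A has processed the shingle rows listed in I
def pvE (asl : List String) (dsl : List (String × List String)) (I : List Nat) (k j : Nat) : Int :=
  I.foldl (fun s i =>
    if asl.getD i "" ∈ (dsl.getD j ("", [])).2 then pvStep s (pvHv (asl.length : Int) i k) else s) (-1)

-- normalized body of A's per-document loop (for one shingle row i, current hash row chl)
def pvSig0 (st : List (List Int)) (j : Nat) : List Int := st.map (fun row => row.getD j 0)

def pvSig (chl sg0 : List Int) (n : Nat) : List Int :=
  (List.range n).foldl (fun sg k =>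
    if sg.getD k 0 = -1 ∨ sg.getD k 0 > chl.getD k 0 then sg.set k (chl.getD k 0) else sg) sg0

def pvWB (j : Nat) (sig : List Int) (st : List (List Int)) : List (List Int) :=
  (List.range sig.length).foldl (fun st k => st.set k ((st.getD k []).set j (sig.getD k 0))) st

def pvJB (asl : List String) (dsl : List (String × List String)) (chl : List Int) (i : Nat)
    (st : List (List Int)) (j : Nat) : List (List Int) :=
  if asl.getD i "" ∈ (dsl.getD j ("", [])).2 then
    pvWB j (pvSig chl (pvSig0 st j) st.length) st
  else st

theorem pv_setfold0'' {α : Type} (d : α) (F : Nat → α → α) (g : List α → Nat → List α)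
    (hg : ∀ r t, g r t = r.set t (F t (r.getD t d))) (n : Nat) (r : List α) (hl : r.length = n) :
    (List.range n).foldl g r = (List.range n).map (fun t => F t (r.getD t d)) := by
  have : g = fun r t => r.set t (F t (r.getD t d)) := funext fun r => funext (hg r)
  rw [this]
  exact pv_setfold0' d F n r hl

theorem pv_set_map_range {α : Type} (m j0 : Nat) (e : Nat → α) (v : α) :
    ((List.range m).map e).set j0 v = (List.range m).map (fun j => if j = j0 then v else e j) := by
  apply List.ext_getElem
  · simp
  · intro idx h1 h2
    simp only [List.getElem_set, List.getElem_map, List.getElem_range]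
    split <;> simp_all [eq_comm]

theorem pv_jstep (asl : List String) (dsl : List (String × List String)) (m Hn : Nat)
    (e : Nat → Nat → Int) (chl : List Int) (i j0 : Nat) (hj0 : j0 < m) :
    pvJB asl dsl chl i ((List.range Hn).map (fun k => (List.range m).map (e k))) j0
    = (List.range Hn).map (fun k => (List.range m).map (fun j =>
        if j = j0 ∧ asl.getD i "" ∈ (dsl.getD j0 ("", [])).2 then pvStep (e k j0) (chl.getD k 0) else e k j)) := by
  unfold pvJB
  by_cases hmem : asl.getD i "" ∈ (dsl.getD j0 ("", [])).2
  · rw [if_pos hmem]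
    have h0 : pvSig0 ((List.range Hn).map (fun k => (List.range m).map (e k))) j0
        = (List.range Hn).map (fun k => e k j0) := by
      unfold pvSig0
      rw [List.map_map]
      apply List.map_congr_left
      intro k _
      exact PySem.List.getD_map_range (e k) m j0 0 hj0
    have h1 : pvSig chl (pvSig0 ((List.range Hn).map (fun k => (List.range m).map (e k))) j0)
        ((List.range Hn).map (fun k => (List.range m).map (e k))).length
        = (List.range Hn).map (fun k => pvStep (e k j0) (chl.getD k 0)) := by
      rw [h0]
      unfold pvSig
      simp only [List.length_map, List.length_range]
      rw [pv_setfold0'' (0:Int)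
        (fun k o => if o = -1 ∨ o > chl.getD k 0 then chl.getD k 0 else o)
        _ (fun r t => pv_condset r t (chl.getD t 0) 0 _) _ _ (by simp)]
      apply List.map_congr_left
      intro k hk
      rw [PySem.List.getD_map_range _ Hn k 0 (List.mem_range.mp hk)]
      rfl
    rw [h1]
    unfold pvWB
    rw [pv_setfold0'' ([] : List Int)
      (fun k row => row.set j0 (((List.range Hn).map (fun k => pvStep (e k j0) (chl.getD k 0))).getD k 0))
      _ (fun r t => rfl) _ _ (by simp)]
    · simp only [List.length_map, List.length_range]
      apply List.map_congr_left
      intro k hk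
      have hk' : k < Hn := List.mem_range.mp hk
      rw [PySem.List.getD_map_range _ Hn k [] hk',
          PySem.List.getD_map_range _ Hn k 0 hk',
          pv_set_map_range m j0 (e k) _]
      apply List.map_congr_left
      intro j _
      by_cases hj : j = j0
      · rw [if_pos hj, if_pos ⟨hj, hmem⟩]
      · rw [if_neg hj, if_neg (fun hc => hj hc.1)]
  · rw [if_neg hmem]
    apply List.map_congr_left
    intro k _
    apply List.map_congr_left
    intro j _
    rw [if_neg (by tauto)]

theorem pv_jfold (asl : List String) (dsl : List (String × List String)) (Hn m : Nat)
    (chl : List Int) (i : Nat) :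
    ∀ (js : List Nat) (e : Nat → Nat → Int), js.Nodup → (∀ j ∈ js, j < m) →
      js.foldl (pvJB asl dsl chl i) ((List.range Hn).map (fun k => (List.range m).map (e k)))
      = (List.range Hn).map (fun k => (List.range m).map (fun j =>
          if j ∈ js ∧ asl.getD i "" ∈ (dsl.getD j ("", [])).2 then pvStep (e k j) (chl.getD k 0) else e k j)) := by
  intro js
  induction js with
  | nil =>
    intro e _ _
    simp
  | cons j0 rest ih =>
    intro e hnd hb
    simp only [List.foldl_cons]
    rw [pv_jstep asl dsl m Hn e chl i j0 (hb j0 (by simp))]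
    rw [ih _ (List.nodup_cons.mp hnd).2 (fun j hj => hb j (by simp [hj]))]
    apply List.map_congr_left
    intro k _
    apply List.map_congr_left
    intro j _
    have hj0rest : j0 ∉ rest := (List.nodup_cons.mp hnd).1
    by_cases hne : j = j0
    · subst hne
      split_ifs <;> simp_all
    · split_ifs <;> simp_all

theorem pv_ifold (nH : Int) (asl : List String) (dsl : List (String × List String)) :
    ∀ (I : List Nat), (∀ i ∈ I, i < asl.length) →
      I.foldl (fun st i => (List.range dsl.length).foldl
          (pvJB asl dsl
            (((List.range asl.length).map (fun i' => (List.range nH.toNat).map (fun k => pvHv (asl.length:Int) i' k))).getD i [])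
            i) st)
        ((List.range nH.toNat).map (fun _ => (List.range dsl.length).map (fun _ => (-1:Int))))
      = (List.range nH.toNat).map (fun k => (List.range dsl.length).map (fun j => pvE asl dsl I k j)) := by
  intro I
  induction I using List.reverseRecOn with
  | nil => intro _; rfl
  | append_singleton I i ih =>
    intro hI
    have hi : i < asl.length := hI i (by simp)
    rw [List.foldl_append, ih (fun x hx => hI x (by simp [hx]))]
    simp only [List.foldl_cons, List.foldl_nil]
    rw [PySem.List.getD_map_range _ asl.length i [] hi]
    rw [pv_jfold asl dsl nH.toNat dsl.length _ i (List.range dsl.length) (pvE asl dsl I)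
      (List.nodup_range) (fun j hj => List.mem_range.mp hj)]
    apply List.map_congr_left
    intro k hk
    apply List.map_congr_left
    intro j hj
    have hkH : k < nH.toNat := List.mem_range.mp hk
    rw [PySem.List.getD_map_range _ nH.toNat k 0 hkH]
    have hE : pvE asl dsl (I ++ [i]) k j
        = if asl.getD i "" ∈ (dsl.getD j ("", [])).2 then pvStep (pvE asl dsl I k j) (pvHv (asl.length:Int) i k)
          else pvE asl dsl I k j := by
      unfold pvE
      rw [List.foldl_append]
      simp
    rw [hE]
    by_cases hm2 : asl.getD i "" ∈ (dsl.getD j ("", [])).2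
    · rw [if_pos ⟨hj, hm2⟩, if_pos hm2]
    · rw [if_neg (fun hc => hm2 hc.2), if_neg hm2]

theorem pv_ifold' (nH : Int) (asl : List String) (dsl : List (String × List String)) :
    (List.foldl
      (fun x y =>
        List.foldl
          (fun x y_1 =>
            if asl.getD y "" ∈ (dsl.getD y_1 ("", [])).2 then
              List.foldl
                (fun x_1 y_2 =>
                  x_1.set y_2
                    ((x_1.getD y_2 []).set y_1
                      ((List.foldl
                            (fun x y_3 =>
                              if x.getD y_3 0 = -1 ∨ x.getD y_3 0 >
                                    ((List.map (fun i => List.map (fun k => pvHv (↑asl.length) i k) (List.range nH.toNat)) (List.range asl.length)).getD y []).getD y_3 0 then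
                                x.set y_3 (((List.map (fun i => List.map (fun k => pvHv (↑asl.length) i k) (List.range nH.toNat)) (List.range asl.length)).getD y []).getD y_3 0)
                              else x)
                            (List.map (fun row => row.getD y_1 0) x) (List.range x.length)).getD y_2 0)))
                x
                (List.range
                  (List.foldl
                      (fun x y_2 =>
                        if x.getD y_2 0 = -1 ∨ x.getD y_2 0 >
                              ((List.map (fun i => List.map (fun k => pvHv (↑asl.length) i k) (List.range nH.toNat)) (List.range asl.length)).getD y []).getD y_2 0 then
                          x.set y_2 (((List.map (fun i => List.map (fun k => pvHv (↑asl.length) i k) (List.range nH.toNat)) (List.range asl.length)).getD y []).getD y_2 0)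
                        else x)
                      (List.map (fun row => row.getD y_1 0) x) (List.range x.length)).length)
            else x)
          x (List.range dsl.length))
      (List.map (fun _ => List.map (fun _ => (-1:Int)) (List.range dsl.length)) (List.range nH.toNat))
      (List.range asl.length))
    = (List.range nH.toNat).map (fun k => (List.range dsl.length).map (fun j => pvE asl dsl (List.range asl.length) k j)) := by
  exact pv_ifold nH asl dsl (List.range asl.length) (fun i hi => List.mem_range.mp hi)

theorem pv_A_norm (nH : Int) (asl : List String) (dsl : List (String × List String)) :
    minHashing nH asl dsl = (List.range dsl.length).map (fun j =>
      ((dsl.getD j ("", [])).1, (List.range nH.toNat).map (fun k => pvE asl dsl (List.range asl.length) k j))) := by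
  simp only [minHashing, PySem.List.len_eq]
  rw [pv_A_ht nH asl.length]
  rw [PySem.List.foldl_append_singleton_eq_map, List.nil_append]
  simp only [pv_range0, List.foldl_map, List.map_map, Function.comp_def,
    PySem.List.pyGetD_natCast, PySem.List.pySetD_natCast, List.length_map,
    Int.toNat_natCast]
  rw [pv_ifold' nH asl dsl]
  apply List.map_congr_left
  intro j hj
  have hjm : j < dsl.length := List.mem_range.mp hj
  refine congrArg _ ?_
  rw [List.map_map]
  apply List.map_congr_left
  intro k _
  simp only [Function.comp_apply]
  exact PySem.List.getD_map_range _ dsl.length j 0 hjm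

theorem pv_map_eta {α β : Type} (l : List α) (f : α → β) (d : α) :
    l.map f = (List.range l.length).map (fun j => f (l.getD j d)) := by
  apply List.ext_getElem
  · simp
  · intro i h1 h2
    simp only [List.getElem_map, List.getElem_range]
    rw [List.getD_eq_getElem l d (by simpa using h1)]

theorem pv_canon (asl : List String) (dsl : List (String × List String)) (k j : Nat) :
    pvE asl dsl (List.range asl.length) k j
    = (PySem.List.min?
        (((List.range asl.length).filter (fun i => decide (asl.getD i "" ∈ (dsl.getD j ("", [])).2))).map
          (fun i => pvHv (asl.length : Int) i k)) (fun x => x)).getD (-1) := by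
  unfold pvE
  rw [PySem.List.foldl_ite_eq_foldl_filter]
  rw [← List.foldl_map]
  apply Eq.trans (pv_fold_step_min _ ?_)
  · rfl
  · intro x hx
    obtain ⟨i, hi, rfl⟩ := List.mem_map.mp hx
    have hin : i ∈ List.range asl.length := List.mem_of_mem_filter hi
    have hnn : 0 < asl.length := by
      have := List.mem_range.mp hin; omega
    exact PySem.Int.mod_nonneg _ (by exact_mod_cast hnn)

theorem pv_B_norm (nH : Int) (asl : List String) (dsl : List (String × List String)) :
    minHashing_alt nH asl dsl = (List.range dsl.length).map (fun j =>
      ((dsl.getD j ("", [])).1, (List.range nH.toNat).map (fun k => pvE asl dsl (List.range asl.length) k j))) := by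
  simp only [minHashing_alt, PySem.List.len_eq]
  rw [pv_map_eta dsl _ ("", [])]
  apply List.map_congr_left
  intro j hj
  refine congrArg _ ?_
  rw [pv_range0 nH, List.map_map]
  apply List.map_congr_left
  intro k _
  simp only [Function.comp_apply]
  rw [pv_canon asl dsl k j]
  rw [pv_range0n asl.length, List.filter_map, List.map_map]
  refine congrArg (fun L => (PySem.List.min? L (fun x => x)).getD (-1)) ?_
  have hfil : List.filter ((fun i => decide (PySem.List.pyGetD asl i "" ∈ (dsl.getD j ("", [])).2)) ∘ (fun k : Nat => (k:Int))) (List.range asl.length)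
      = List.filter (fun i => decide (asl.getD i "" ∈ (dsl.getD j ("", [])).2)) (List.range asl.length) := by
    apply List.filter_congr
    intro i _
    simp [Function.comp, PySem.List.pyGetD_natCast]
  rw [hfil]
  apply List.map_congr_left
  intro i _
  simp [pvHv, Function.comp]

-- ===== VERDICT (by name: the statement is the Claim_ definition above) =====
theorem minHashing_spec : Claim_equal_minHashing := by
  intro num_hash all_shingle_list doc_shingle_list _
  unfold Spec_minHashing
  rw [pv_A_norm, pv_B_norm]
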